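-- pv_equiv track=rewrite | github.com/Rajdoll/RAJDOLL | multi_agent_system/utils/attack_chain_detector.py | _determine_chain_impact
-- ===== SOURCE A (Python) =====
-- from enum import Enum
-- from typing import Any, Dict, List, Optional, Set, Tuple
--
-- class ChainImpact(str, Enum):
--     """Impact levels for attack chains"""
--     CRITICAL = "critical"  # Full system compromise
--     HIGH = "high"          # Significant data breach or access
--     MEDIUM = "medium"      # Limited unauthorized access
--     LOW = "low"            # Minor security issue
--
-- def _determine_chain_impact(steps: List[Dict[str, Any]]) -> ChainImpact:
--     """Determine impact based on vulnerability types in chain"""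
--     types = {s["type"].upper() for s in steps}
--
--     # Critical if RCE or complete auth bypass
--     critical_indicators = {"RCE", "COMMAND_INJECTION", "ADMIN_ACCESS", "DATABASE_DUMP"}
--     if types.intersection(critical_indicators):
--         return ChainImpact.CRITICAL
--
--     # High if account takeover or significant data access
--     high_indicators = {"ACCOUNT_TAKEOVER", "SESSION_HIJACK", "PRIVILEGE_ESCALATION", "DATA_EXTRACTION"}
--     if types.intersection(high_indicators):
--         return ChainImpact.HIGH
--
--     # Medium for auth/session issues
--     medium_indicators = {"AUTH_BYPASS", "SESSION_FIXATION", "IDOR"}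
--     if types.intersection(medium_indicators):
--         return ChainImpact.MEDIUM
--
--     return ChainImpact.LOW
-- ===== SOURCE B (Python) =====
-- from enum import Enum
-- from typing import Any, Dict, List, Optional, Set, Tuple
--
-- class ChainImpact(str, Enum):
--     """Impact levels for attack chains"""
--     CRITICAL = "critical"
--     HIGH = "high"
--     MEDIUM = "medium"
--     LOW = "low"
--
-- _RANK = {
--     "RCE": 3, "COMMAND_INJECTION": 3, "ADMIN_ACCESS": 3, "DATABASE_DUMP": 3,
--     "ACCOUNT_TAKEOVER": 2, "SESSION_HIJACK": 2, "PRIVILEGE_ESCALATION": 2, "DATA_EXTRACTION": 2,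
--     "AUTH_BYPASS": 1, "SESSION_FIXATION": 1, "IDOR": 1,
-- }
-- _IMPACT = {0: ChainImpact.LOW, 1: ChainImpact.MEDIUM, 2: ChainImpact.HIGH, 3: ChainImpact.CRITICAL}
--
-- def _determine_chain_impact(steps: List[Dict[str, Any]]) -> ChainImpact:
--     """Determine impact based on vulnerability types in chain"""
--     best = 0
--     for s in steps:
--         best = max(best, _RANK.get(s["type"].upper(), 0))
--     return _IMPACT[best]
-- ===== Notes on version B (the rewrite author's own statement) =====
-- stated objective: simpler
-- what changed: Replaced the set comprehension plus three set intersections against indicator sets by a single pass that folds the maximum severity rank from one type->rank table and maps the final rank to the impact level.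
import Mathlib
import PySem

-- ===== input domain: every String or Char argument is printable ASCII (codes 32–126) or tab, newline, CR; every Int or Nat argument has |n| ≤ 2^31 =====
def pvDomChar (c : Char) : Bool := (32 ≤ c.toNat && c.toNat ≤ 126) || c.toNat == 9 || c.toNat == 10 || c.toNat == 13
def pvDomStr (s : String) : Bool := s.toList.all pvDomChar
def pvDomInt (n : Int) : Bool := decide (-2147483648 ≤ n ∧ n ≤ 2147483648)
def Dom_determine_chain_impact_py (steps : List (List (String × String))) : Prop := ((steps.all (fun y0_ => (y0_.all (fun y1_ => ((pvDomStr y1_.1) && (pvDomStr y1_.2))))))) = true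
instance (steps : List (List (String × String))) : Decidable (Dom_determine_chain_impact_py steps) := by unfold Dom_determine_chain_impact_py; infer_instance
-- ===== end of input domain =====

-- B replaces A's set comprehension and three set intersections by one fold of the maximum
-- severity rank from a type→rank table (objective: simpler).

-- ===== PORT A =====
-- dict lookup d[k] / d.get(k, dflt): first match in the association list (exact for the
-- input dicts under the type convention and for the literal tables, whose keys are distinct).
def pvLookup {a b : Type} [BEq a] (tbl : List (a × b)) (k : a) : Option b :=
  (tbl.find? (fun p => p.1 == k)).map (fun p => p.2)

-- s["type"]: under Pre_ the key is present; the .getD "" default is never used there.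
def pvTypeOf (s : List (String × String)) : String :=
  PySem.Str.upper ((pvLookup s "type").getD "")

def determine_chain_impact_py (steps : List (List (String × String))) : String :=
  let types : PySem.Set String := PySem.Set.ofList (steps.map pvTypeOf)
  let critical_indicators : PySem.Set String :=
    PySem.Set.ofList ["RCE", "COMMAND_INJECTION", "ADMIN_ACCESS", "DATABASE_DUMP"]
  if PySem.Set.inter types critical_indicators ≠ [] then "critical"
  else
    let high_indicators : PySem.Set String :=
      PySem.Set.ofList ["ACCOUNT_TAKEOVER", "SESSION_HIJACK", "PRIVILEGE_ESCALATION", "DATA_EXTRACTION"]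
    if PySem.Set.inter types high_indicators ≠ [] then "high"
    else
      let medium_indicators : PySem.Set String :=
        PySem.Set.ofList ["AUTH_BYPASS", "SESSION_FIXATION", "IDOR"]
      if PySem.Set.inter types medium_indicators ≠ [] then "medium"
      else "low"

-- ===== PORT B =====
def pvRankTable : List (String × Int) :=
  [("RCE", 3), ("COMMAND_INJECTION", 3), ("ADMIN_ACCESS", 3), ("DATABASE_DUMP", 3),
   ("ACCOUNT_TAKEOVER", 2), ("SESSION_HIJACK", 2), ("PRIVILEGE_ESCALATION", 2), ("DATA_EXTRACTION", 2),
   ("AUTH_BYPASS", 1), ("SESSION_FIXATION", 1), ("IDOR", 1)]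

def pvImpactTable : List (Int × String) :=
  [(0, "low"), (1, "medium"), (2, "high"), (3, "critical")]

-- _IMPACT[best]: best is always one of 0..3, so the lookup never misses; .getD "low" is dead.
def determine_chain_impact_py_alt (steps : List (List (String × String))) : String :=
  let best : Int := steps.foldl
    (fun b s => max b ((pvLookup pvRankTable (pvTypeOf s)).getD 0)) 0
  (pvLookup pvImpactTable best).getD "low"

-- ===== PRECONDITION & SPEC =====
-- Pre_: every step dict has the key "type" (otherwise both Pythons raise KeyError at s["type"]).
def Pre_determine_chain_impact_py (steps : List (List (String × String))) : Prop :=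
  (steps.all (fun s => (pvLookup s "type").isSome)) = true
instance (steps : List (List (String × String))) : Decidable (Pre_determine_chain_impact_py steps) := by
  unfold Pre_determine_chain_impact_py; infer_instance

def pvWitness_determine_chain_impact_py : (List (List (String × String))) :=
  [[("type", "idor")], [("type", "rce"), ("note", "x")]]

def Spec_determine_chain_impact_py (steps : List (List (String × String))) (out : String) : Prop := out = determine_chain_impact_py_alt steps
instance (steps : List (List (String × String))) (out : String) : Decidable (Spec_determine_chain_impact_py steps out) := by unfold Spec_determine_chain_impact_py; infer_instance

-- ===== CLAIM (what is proved, stated in full; the proofs are below) =====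
def Claim_equal_determine_chain_impact_py : Prop := ∀ (steps : List (List (String × String))), Dom_determine_chain_impact_py steps → Pre_determine_chain_impact_py steps → Spec_determine_chain_impact_py steps (determine_chain_impact_py steps)

-- ===== LEMMAS AND PROOFS =====

def pvRank (t : String) : Int := (pvLookup pvRankTable t).getD 0

lemma pvRank_spec (t : String) :
    pvRank t =
      if t ∈ ["RCE", "COMMAND_INJECTION", "ADMIN_ACCESS", "DATABASE_DUMP"] then 3
      else if t ∈ ["ACCOUNT_TAKEOVER", "SESSION_HIJACK", "PRIVILEGE_ESCALATION", "DATA_EXTRACTION"] then 2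
      else if t ∈ ["AUTH_BYPASS", "SESSION_FIXATION", "IDOR"] then 1
      else 0 := by
  by_cases h1 : t = "RCE"
  · subst h1; decide
  by_cases h2 : t = "COMMAND_INJECTION"
  · subst h2; decide
  by_cases h3 : t = "ADMIN_ACCESS"
  · subst h3; decide
  by_cases h4 : t = "DATABASE_DUMP"
  · subst h4; decide
  by_cases h5 : t = "ACCOUNT_TAKEOVER"
  · subst h5; decide
  by_cases h6 : t = "SESSION_HIJACK"
  · subst h6; decide
  by_cases h7 : t = "PRIVILEGE_ESCALATION"
  · subst h7; decide
  by_cases h8 : t = "DATA_EXTRACTION"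
  · subst h8; decide
  by_cases h9 : t = "AUTH_BYPASS"
  · subst h9; decide
  by_cases h10 : t = "SESSION_FIXATION"
  · subst h10; decide
  by_cases h11 : t = "IDOR"
  · subst h11; decide
  have hnone : pvRankTable.find? (fun p => p.1 == t) = none := by
    rw [List.find?_eq_none]
    intro p hp
    simp only [pvRankTable, List.mem_cons, List.not_mem_nil, or_false] at hp
    rcases hp with rfl|rfl|rfl|rfl|rfl|rfl|rfl|rfl|rfl|rfl|rfl <;> simp only [beq_iff_eq] <;> intro h
    exacts [h1 h.symm, h2 h.symm, h3 h.symm, h4 h.symm, h5 h.symm, h6 h.symm, h7 h.symm, h8 h.symm, h9 h.symm, h10 h.symm, h11 h.symm]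
  simp [pvRank, pvLookup, hnone, h1, h2, h3, h4, h5, h6, h7, h8, h9, h10, h11]

lemma pvRank_le_three (t : String) : pvRank t ≤ 3 := by
  rw [pvRank_spec]; split_ifs <;> norm_num

lemma pvFold_pull (us : List String) (b : Int) (hb : 0 ≤ b) :
    us.foldl (fun a t => max a (pvRank t)) b
      = max b (us.foldl (fun a t => max a (pvRank t)) 0) := by
  induction us generalizing b with
  | nil => simp only [List.foldl_nil]; omega
  | cons t us ih =>
    simp only [List.foldl_cons]
    rw [ih _ (by omega : (0:Int) ≤ max b (pvRank t)),
        ih _ (by omega : (0:Int) ≤ max 0 (pvRank t))]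
    omega

lemma pvFold_ge_iff (us : List String) (k : Int) (hk : 1 ≤ k) :
    k ≤ us.foldl (fun a t => max a (pvRank t)) 0 ↔ ∃ t ∈ us, k ≤ pvRank t := by
  induction us with
  | nil => simp only [List.foldl_nil, List.not_mem_nil]; constructor
           · intro h; omega
           · rintro ⟨x, hx, -⟩; exact absurd hx (by simp)
  | cons t us ih =>
    rw [List.foldl_cons, pvFold_pull us _ (by omega), le_max_iff, le_max_iff, ih]
    simp only [List.mem_cons]
    constructor
    · rintro ((h0 | h) | ⟨x, hx, hkx⟩)
      · omega
      · exact ⟨t, Or.inl rfl, h⟩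
      · exact ⟨x, Or.inr hx, hkx⟩
    · rintro ⟨x, hx | hx, hkx⟩
      · subst hx; exact Or.inl (Or.inr hkx)
      · exact Or.inr ⟨x, hx, hkx⟩

lemma pvInter_ne_nil_iff (us : List String) (c : List String) :
    PySem.Set.inter (PySem.Set.ofList us) c ≠ [] ↔ ∃ t ∈ us, t ∈ c := by
  rw [← List.isEmpty_eq_false_iff, List.isEmpty_eq_false_iff_exists_mem]
  constructor
  · rintro ⟨x, hx⟩
    rw [PySem.Set.mem_inter, PySem.Set.mem_ofList] at hx
    exact ⟨x, hx.1, hx.2⟩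
  · rintro ⟨x, hx, hc⟩
    exact ⟨x, by rw [PySem.Set.mem_inter, PySem.Set.mem_ofList]; exact ⟨hx, hc⟩⟩

theorem determine_chain_impact_py_spec : Claim_equal_determine_chain_impact_py := by
  intro steps _ _
  unfold Spec_determine_chain_impact_py determine_chain_impact_py determine_chain_impact_py_alt
  rw [show (steps.foldl (fun b s => max b ((pvLookup pvRankTable (pvTypeOf s)).getD 0)) 0)
        = (steps.map pvTypeOf).foldl (fun a t => max a (pvRank t)) 0 by
      rw [List.foldl_map]; rfl]
  set us := steps.map pvTypeOf with hus
  set m := us.foldl (fun a t => max a (pvRank t)) 0 with hm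
  have hm0 : 0 ≤ m := by
    rw [hm, pvFold_pull us 0 le_rfl]; omega
  have hm3 : m ≤ 3 := by
    rw [hm]
    clear hm hus hm0
    induction us with
    | nil => simp
    | cons t us ih =>
      rw [List.foldl_cons, pvFold_pull us _ (by omega)]
      have := pvRank_le_three t
      omega
  have hcrit : PySem.Set.inter (PySem.Set.ofList us)
      (PySem.Set.ofList ["RCE", "COMMAND_INJECTION", "ADMIN_ACCESS", "DATABASE_DUMP"]) ≠ []
      ↔ 3 ≤ m := by
    rw [show (PySem.Set.ofList ["RCE", "COMMAND_INJECTION", "ADMIN_ACCESS", "DATABASE_DUMP"]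
        : PySem.Set String) = ["RCE", "COMMAND_INJECTION", "ADMIN_ACCESS", "DATABASE_DUMP"] from by decide]
    rw [pvInter_ne_nil_iff, hm, pvFold_ge_iff us 3 (by norm_num)]
    constructor
    · rintro ⟨t, ht, hc⟩
      exact ⟨t, ht, by rw [pvRank_spec]; simp [hc]⟩
    · rintro ⟨t, ht, h3⟩
      refine ⟨t, ht, ?_⟩
      by_contra hc
      rw [pvRank_spec] at h3
      simp only [hc, if_false] at h3
      split_ifs at h3 <;> omega
  have hhigh : PySem.Set.inter (PySem.Set.ofList us)
      (PySem.Set.ofList ["ACCOUNT_TAKEOVER", "SESSION_HIJACK", "PRIVILEGE_ESCALATION", "DATA_EXTRACTION"]) ≠ []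
      ↔ ∃ t ∈ us, pvRank t = 2 := by
    rw [show (PySem.Set.ofList ["ACCOUNT_TAKEOVER", "SESSION_HIJACK", "PRIVILEGE_ESCALATION", "DATA_EXTRACTION"]
        : PySem.Set String) = ["ACCOUNT_TAKEOVER", "SESSION_HIJACK", "PRIVILEGE_ESCALATION", "DATA_EXTRACTION"] from by decide]
    rw [pvInter_ne_nil_iff]
    constructor
    · rintro ⟨t, ht, hc⟩
      refine ⟨t, ht, ?_⟩
      rw [pvRank_spec]
      have : t ∉ ["RCE", "COMMAND_INJECTION", "ADMIN_ACCESS", "DATABASE_DUMP"] := by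
        intro h; fin_cases h <;> simp_all
      simp [this, hc]
    · rintro ⟨t, ht, h2⟩
      refine ⟨t, ht, ?_⟩
      by_contra hc
      rw [pvRank_spec] at h2
      split_ifs at h2 <;> simp_all
  have hmed : PySem.Set.inter (PySem.Set.ofList us)
      (PySem.Set.ofList ["AUTH_BYPASS", "SESSION_FIXATION", "IDOR"]) ≠ []
      ↔ ∃ t ∈ us, pvRank t = 1 := by
    rw [show (PySem.Set.ofList ["AUTH_BYPASS", "SESSION_FIXATION", "IDOR"]
        : PySem.Set String) = ["AUTH_BYPASS", "SESSION_FIXATION", "IDOR"] from by decide]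
    rw [pvInter_ne_nil_iff]
    constructor
    · rintro ⟨t, ht, hc⟩
      refine ⟨t, ht, ?_⟩
      rw [pvRank_spec]
      have h1 : t ∉ ["RCE", "COMMAND_INJECTION", "ADMIN_ACCESS", "DATABASE_DUMP"] := by
        intro h; fin_cases h <;> simp_all
      have h2 : t ∉ ["ACCOUNT_TAKEOVER", "SESSION_HIJACK", "PRIVILEGE_ESCALATION", "DATA_EXTRACTION"] := by
        intro h; fin_cases h <;> simp_all
      simp [h1, h2, hc]
    · rintro ⟨t, ht, h1⟩
      refine ⟨t, ht, ?_⟩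
      by_contra hc
      rw [pvRank_spec] at h1
      split_ifs at h1 <;> simp_all
  -- reduce both sides by the value of m
  have hge2 : 2 ≤ m ↔ ∃ t ∈ us, 2 ≤ pvRank t := by rw [hm]; exact pvFold_ge_iff us 2 (by norm_num)
  have hge1 : 1 ≤ m ↔ ∃ t ∈ us, 1 ≤ pvRank t := by rw [hm]; exact pvFold_ge_iff us 1 (by norm_num)
  have hge3 : 3 ≤ m ↔ ∃ t ∈ us, 3 ≤ pvRank t := by rw [hm]; exact pvFold_ge_iff us 3 (by norm_num)
  dsimp only
  split_ifs with h1 h2 h3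
  · -- critical branch
    have : 3 ≤ m := hcrit.mp h1
    have : m = 3 := by omega
    rw [this]; decide
  · -- high branch
    obtain ⟨t, ht, h2'⟩ := hhigh.mp h2
    have hle2 : 2 ≤ m := hge2.mpr ⟨t, ht, by omega⟩
    have hne3 : ¬ 3 ≤ m := fun h => h1 (hcrit.mpr h)
    have : m = 2 := by omega
    rw [this]; decide
  · -- medium branch
    obtain ⟨t, ht, h3'⟩ := hmed.mp h3
    have hle1 : 1 ≤ m := hge1.mpr ⟨t, ht, by omega⟩
    have hne3 : ¬ 3 ≤ m := fun h => h1 (hcrit.mpr h)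
    have hne2 : ¬ 2 ≤ m := by
      intro h
      obtain ⟨t', ht', hr⟩ := hge2.mp h
      have hr3 := pvRank_le_three t'
      rcases (show pvRank t' = 2 ∨ pvRank t' = 3 by omega) with h' | h'
      · exact h2 (hhigh.mpr ⟨t', ht', h'⟩)
      · exact h1 (hcrit.mpr (hge3.mpr ⟨t', ht', by omega⟩))
    have : m = 1 := by omega
    rw [this]; decide
  · -- low branch
    have hne1 : ¬ 1 ≤ m := by
      intro h
      obtain ⟨t', ht', hr⟩ := hge1.mp h
      have hr3 := pvRank_le_three t'
      rcases (show pvRank t' = 1 ∨ pvRank t' = 2 ∨ pvRank t' = 3 by omega) with h' | h' | h'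
      · exact h3 (hmed.mpr ⟨t', ht', h'⟩)
      · exact h2 (hhigh.mpr ⟨t', ht', h'⟩)
      · exact h1 (hcrit.mpr (hge3.mpr ⟨t', ht', by omega⟩))
    have : m = 0 := by omega
    rw [this]; decide
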